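-- pv_equiv track=rewrite | github.com/sudhan7/A2Z_Strivers_DSA_Sheet | Day 34/sumOfSubarray_ranges.py | findNLE
-- ===== SOURCE A (Python) =====
-- def findNLE(arr):
--     res = [0] * len(arr)
--     stack = []
--
--     for i in range(len(arr)-1,-1,-1):
--         while stack and arr[stack[-1]] <= arr[i]:
--             stack.pop()
--         res[i] = stack[-1] if stack else len(arr)
--         stack.append(i)
--     return res
-- ===== SOURCE B (Python) =====
-- def findNLE(arr):
--     n = len(arr)
--     res = []
--     for i in range(n):
--         j = i + 1
--         while j < n and arr[j] <= arr[i]: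
--             j += 1
--         res.append(j)
--     return res
-- ===== Notes on version B (the rewrite author's own statement) =====
-- stated objective: simpler
-- what changed: Replaces A's backward pass with a monotonic index stack by a plain nested loop that, for each index, scans forward for the first strictly greater element (defaulting to len(arr)).
import Mathlib
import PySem

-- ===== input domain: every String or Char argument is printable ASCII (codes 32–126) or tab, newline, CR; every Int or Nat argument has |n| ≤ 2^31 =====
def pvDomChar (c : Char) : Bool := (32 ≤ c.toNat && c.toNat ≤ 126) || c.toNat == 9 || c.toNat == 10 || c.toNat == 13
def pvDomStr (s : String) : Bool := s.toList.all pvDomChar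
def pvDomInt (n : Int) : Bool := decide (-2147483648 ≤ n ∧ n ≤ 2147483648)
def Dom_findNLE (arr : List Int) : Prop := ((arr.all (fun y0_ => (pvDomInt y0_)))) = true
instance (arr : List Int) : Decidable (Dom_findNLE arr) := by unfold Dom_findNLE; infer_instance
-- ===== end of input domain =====

-- B replaces A's backward monotonic-stack pass by a direct forward scan per index (simpler, no stack; same values).

-- ===== PORT A =====
-- Python's 'while stack and arr[stack[-1]] <= arr[i]: stack.pop()'.
-- The stack is kept top-first; every index on it is in range, so arr.getD t 0 is exactly Python's arr[stack[-1]].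
def popWhileA (arr : List Int) (v : Int) : List Nat → List Nat
  | [] => []
  | t :: rest => if arr.getD t 0 ≤ v then popWhileA arr v rest else t :: rest

-- the 'for i in range(len(arr)-1,-1,-1)' loop: i counts the remaining indices, so step i+1 handles index i;
-- state is (res, stack); every written index i is in range, so res.set i is exactly Python's res[i] = …
def loopA (arr : List Int) : Nat → List Int × List Nat → List Int × List Nat
  | 0, st => st
  | i + 1, (res, stack) =>
    let stack' := popWhileA arr (arr.getD i 0) stack
    let r : Int := match stack' with | [] => (arr.length : Int) | t :: _ => (t : Int)
    loopA arr i (res.set i r, i :: stack')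

def findNLE (arr : List Int) : List Int :=
  (loopA arr arr.length (List.replicate arr.length 0, [])).1

-- ===== PORT B =====
-- 'j = i + 1; while j < n and arr[j] <= arr[i]: j += 1'; j stays in range, arr.getD j 0 is Python's arr[j]
def scanB (arr : List Int) (v : Int) (j : Nat) : Int :=
  if _h : j < arr.length then
    if arr.getD j 0 ≤ v then scanB arr v (j + 1) else (j : Int)
  else (arr.length : Int)
termination_by arr.length - j

def findNLE_alt (arr : List Int) : List Int :=
  (List.range arr.length).map (fun i => scanB arr (arr.getD i 0) (i + 1))

-- ===== PRECONDITION & SPEC =====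
def Spec_findNLE (arr : List Int) (out : List Int) : Prop := out = findNLE_alt arr
instance (arr : List Int) (out : List Int) : Decidable (Spec_findNLE arr out) := by unfold Spec_findNLE; infer_instance

-- ===== CLAIM (what is proved, stated in full; the proofs are below) =====
def Claim_equal_findNLE : Prop := ∀ (arr : List Int), Dom_findNLE arr → Spec_findNLE arr (findNLE arr)

-- ===== LEMMAS AND PROOFS =====

-- the stack A's loop holds just before processing index i-1 (i.e. after indices i..n-1)
def goodStack (arr : List Int) (i : Nat) : List Nat :=
  if _h : i < arr.length then i :: popWhileA arr (arr.getD i 0) (goodStack arr (i + 1)) else []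
termination_by arr.length - i

def intHead (arr : List Int) : List Nat → Int
  | [] => (arr.length : Int)
  | t :: _ => (t : Int)

lemma pop_pop (arr : List Int) {u v : Int} (huv : u ≤ v) :
    ∀ s, popWhileA arr v (popWhileA arr u s) = popWhileA arr v s := by
  intro s
  induction s with
  | nil => rfl
  | cons t rest ih =>
    by_cases h : arr.getD t 0 ≤ u
    · rw [show popWhileA arr u (t :: rest) = popWhileA arr u rest from by
          rw [popWhileA, if_pos h], ih,
        show popWhileA arr v (t :: rest) = popWhileA arr v rest from by
          rw [popWhileA, if_pos (le_trans h huv)]]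
    · rw [show popWhileA arr u (t :: rest) = t :: rest from by rw [popWhileA, if_neg h]]

lemma pop_good (arr : List Int) (v : Int) (i : Nat) :
    intHead arr (popWhileA arr v (goodStack arr i)) = scanB arr v i := by
  have key : ∀ d i, arr.length - i ≤ d →
      intHead arr (popWhileA arr v (goodStack arr i)) = scanB arr v i := by
    intro d
    induction d with
    | zero =>
      intro i hle
      have h : ¬ i < arr.length := by omega
      rw [goodStack, scanB]
      simp [h, popWhileA, intHead]
    | succ d ih =>
      intro i hle
      by_cases h : i < arr.length
      · rw [goodStack, scanB]
        by_cases hv : arr.getD i 0 ≤ v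
        · simp only [h, dif_pos, hv, if_pos]
          rw [popWhileA, if_pos hv, pop_pop arr hv]
          exact ih (i + 1) (by omega)
        · simp only [h, dif_pos, hv, if_neg, not_false_iff]
          rw [popWhileA, if_neg hv]
          rfl
      · rw [goodStack, scanB]
        simp [h, popWhileA, intHead]
  exact key (arr.length - i) i le_rfl

lemma drop_set_cons {α : Type} (res : List α) (i : Nat) (x : α) (h : i < res.length) :
    (res.set i x).drop i = x :: res.drop (i + 1) := by
  induction res generalizing i with
  | nil => simp at h
  | cons a rest ih =>
    cases i with
    | zero => simp
    | succ i =>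
      simp only [List.set, List.drop_succ_cons]
      exact ih i (by simpa using h)

lemma loopA_good (arr : List Int) :
    ∀ i res, i ≤ res.length → i ≤ arr.length →
      (loopA arr i (res, goodStack arr i)).1 =
        ((List.range i).map (fun k => scanB arr (arr.getD k 0) (k + 1))) ++ res.drop i := by
  intro i
  induction i with
  | zero => intro res _ _; simp [loopA]
  | succ i ih =>
    intro res hres harr
    have hi : i < arr.length := by omega
    have hstack : goodStack arr i = i :: popWhileA arr (arr.getD i 0) (goodStack arr (i + 1)) := by
      rw [goodStack]; simp [hi]
    have hr : (match popWhileA arr (arr.getD i 0) (goodStack arr (i + 1)) with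
        | [] => (arr.length : Int) | t :: _ => (t : Int)) = scanB arr (arr.getD i 0) (i + 1) := by
      have := pop_good arr (arr.getD i 0) (i + 1)
      rw [← this]; cases popWhileA arr (arr.getD i 0) (goodStack arr (i + 1)) <;> rfl
    rw [show (loopA arr (i + 1) (res, goodStack arr (i + 1))) =
        loopA arr i ((res.set i (match popWhileA arr (arr.getD i 0) (goodStack arr (i + 1)) with
          | [] => (arr.length : Int) | t :: _ => (t : Int))),
          i :: popWhileA arr (arr.getD i 0) (goodStack arr (i + 1))) from rfl, hr, ← hstack]
    rw [ih (res.set i (scanB arr (arr.getD i 0) (i + 1))) (by simp; omega) (by omega)]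
    rw [drop_set_cons _ _ _ (by omega), List.range_succ]
    simp

-- ===== VERDICT (by name: the statement is the Claim_ definition above) =====
theorem findNLE_spec : Claim_equal_findNLE := by
  intro arr _
  show findNLE arr = findNLE_alt arr
  unfold findNLE findNLE_alt
  have hgs : goodStack arr arr.length = [] := by rw [goodStack]; simp
  rw [← hgs]
  rw [loopA_good arr arr.length (List.replicate arr.length 0) (by simp) le_rfl]
  simp
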